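-- pv_equiv track=rewrite | github.com/Zazmuz/kattis | open/catcoat/catcoat.py | wild
-- ===== SOURCE A (Python) =====
-- def wild(s):
--     v = [""]
--     for i, ch in enumerate(s):
--         if ch == '-':
--             base = 'b' if i < 2 else 'd' if i < 4 else 'o'  # find base letter
--
--             for j in range(len(v)):
--                 v.append(v[j] + base.upper())
--                 v[j] = v[j] + base
--         else:
--             for idx in range(len(v)):
--                 v[idx] += ch
--     return v
-- ===== SOURCE B (Python) =====
-- def wild(s):
--     res = [""]
--     for i in range(len(s) - 1, -1, -1):
--         ch = s[i]
--         if ch == '-':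
--             base = 'b' if i < 2 else 'd' if i < 4 else 'o'
--             res = [c + t for t in res for c in (base, base.upper())]
--         else:
--             res = [ch + t for t in res]
--     return res
-- ===== Notes on version B (the rewrite author's own statement) =====
-- stated objective: alternative
-- what changed: Replaced A's in-place list-doubling (mutating every entry of a growing list at each character) by a right-to-left recursion over the string that builds the suffix expansions once and prepends each character (or both cases of a wildcard's base letter) to them.
import Mathlib
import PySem

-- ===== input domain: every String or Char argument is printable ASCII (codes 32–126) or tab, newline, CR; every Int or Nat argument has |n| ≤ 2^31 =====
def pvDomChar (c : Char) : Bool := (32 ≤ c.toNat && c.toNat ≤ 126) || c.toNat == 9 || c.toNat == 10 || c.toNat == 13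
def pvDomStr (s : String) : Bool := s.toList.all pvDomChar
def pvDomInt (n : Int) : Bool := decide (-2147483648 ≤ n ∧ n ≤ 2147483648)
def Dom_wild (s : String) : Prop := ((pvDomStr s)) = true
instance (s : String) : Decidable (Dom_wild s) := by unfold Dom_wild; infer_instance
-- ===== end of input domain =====

-- B is an alternative implementation: recursion on the string suffix instead of A's in-place doubling of a mutable list; return values agree everywhere.

-- ===== PORT A =====
-- one iteration of A's outer loop (i, ch are enumerate's index and character)
def wildStep (v : List String) (p : Int × Char) : List String :=
  if p.2 = '-' then
    let base : String := if p.1 < 2 then "b" else if p.1 < 4 then "d" else "o"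
    -- for j in range(len(v)): v.append(v[j] + base.upper()); v[j] = v[j] + base
    (List.range v.length).foldl
      (fun w j =>
        let x := w.getD j ""          -- v[j]; j is always in range here
        (w ++ [x ++ PySem.Str.upper base]).set j (x ++ base)) v
  else
    -- for idx in range(len(v)): v[idx] += ch
    (List.range v.length).foldl
      (fun w idx => w.set idx (w.getD idx "" ++ String.singleton p.2)) v

def wild (s : String) : List String :=
  (PySem.List.enumerate s.toList 0).foldl wildStep [""]

-- ===== PORT B =====
-- one iteration of B's reverse loop (prepends character i to every expansion of the suffix)
def wildPrepend (p : Int × Char) (res : List String) : List String :=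
  if p.2 = '-' then
    let base : String := if p.1 < 2 then "b" else if p.1 < 4 then "d" else "o"
    res.flatMap (fun t => [base ++ t, PySem.Str.upper base ++ t])
  else
    res.map (fun t => String.singleton p.2 ++ t)

-- B walks i = len(s)-1 .. 0 rebuilding res: a right fold over the indexed characters
def wild_alt (s : String) : List String :=
  (PySem.List.enumerate s.toList 0).foldr wildPrepend [""]

-- ===== PRECONDITION & SPEC =====
def Spec_wild (s : String) (out : List String) : Prop := out = wild_alt s
instance (s : String) (out : List String) : Decidable (Spec_wild s out) := by unfold Spec_wild; infer_instance

-- ===== CLAIM (what is proved, stated in full; the proofs are below) =====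
def Claim_equal_wild : Prop := ∀ (s : String), Dom_wild s → Spec_wild s (wild s)

-- ===== LEMMAS AND PROOFS =====


theorem foldl_set_range_map (g : String → String) (v : List String) (j : Nat) (hj : j ≤ v.length) :
    (List.range j).foldl (fun w idx => w.set idx (g (w.getD idx ""))) v
      = (v.take j).map g ++ v.drop j := by
  induction j with
  | zero => simp
  | succ j ih =>
    have hj' : j < v.length := hj
    rw [List.range_succ, List.foldl_append, ih (Nat.le_of_lt hj')]
    simp only [List.foldl_cons, List.foldl_nil]
    have hlen : ((v.take j).map g).length = j := by simp [Nat.min_eq_left (Nat.le_of_lt hj')]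
    have hget : ((v.take j).map g ++ v.drop j).getD j "" = v[j] := by
      rw [List.getD, List.getElem?_append_right (by omega), hlen]
      simp [List.getElem?_drop, List.getElem?_eq_getElem hj']
    rw [hget, List.set_append_right _ _ (by omega), hlen, Nat.sub_self,
        List.drop_eq_getElem_cons hj', List.set_cons_zero,
        List.take_add_one, List.getElem?_eq_getElem hj']
    have hm : ∀ (f : String → String), (List.map f v)[j]? = some (f v[j]) := by
      intro f; rw [List.getElem?_map, List.getElem?_eq_getElem hj']; rfl
    simp only [Option.toList_some, List.map_append, List.map_cons, List.map_nil,
      List.append_assoc, List.cons_append, List.nil_append]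

theorem foldl_double_range (lo up : String) (v : List String) (j : Nat) (hj : j ≤ v.length) :
    (List.range j).foldl
        (fun w j' => let x := w.getD j' ""; (w ++ [x ++ up]).set j' (x ++ lo)) v
      = (v.take j).map (· ++ lo) ++ v.drop j ++ (v.take j).map (· ++ up) := by
  induction j with
  | zero => simp
  | succ j ih =>
    have hj' : j < v.length := hj
    rw [List.range_succ, List.foldl_append, ih (Nat.le_of_lt hj')]
    simp only [List.foldl_cons, List.foldl_nil]
    have hlen : ((v.take j).map (· ++ lo)).length = j := by simp [Nat.min_eq_left (Nat.le_of_lt hj')]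
    have hget : ((v.take j).map (· ++ lo) ++ v.drop j ++ (v.take j).map (· ++ up)).getD j "" = v[j] := by
      rw [List.getD, List.append_assoc, List.getElem?_append_right (by omega), hlen]
      rw [List.getElem?_append_left (by simp; omega)]
      simp [List.getElem?_drop, List.getElem?_eq_getElem hj']
    rw [hget]
    rw [List.append_assoc, List.append_assoc, List.set_append_right _ _ (by omega), hlen, Nat.sub_self]
    rw [List.drop_eq_getElem_cons hj']
    simp only [List.cons_append, List.set_cons_zero]
    rw [List.take_add_one, List.getElem?_eq_getElem hj']
    have hm : ∀ (f : String → String), (List.map f v)[j]? = some (f v[j]) := by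
      intro f; rw [List.getElem?_map, List.getElem?_eq_getElem hj']; rfl
    simp only [Option.toList_some, List.map_append, List.map_cons, List.map_nil,
      List.append_assoc, List.cons_append, List.nil_append]


theorem foldA_eq (t : List Char) : ∀ (i0 : Int) (v : List String),
    (PySem.List.enumerate t i0).foldl wildStep v
      = ((PySem.List.enumerate t i0).foldr wildPrepend [""]).flatMap (fun e => v.map (· ++ e)) := by
  induction t with
  | nil =>
    intro i0 v
    simp [PySem.List.enumerate_nil]
  | cons ch t ih =>
    intro i0 v
    rw [PySem.List.enumerate_cons, List.foldl_cons, List.foldr_cons]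
    by_cases hch : ch = '-'
    · subst hch
      simp only [wildStep, wildPrepend, reduceIte]
      rw [foldl_double_range _ _ v v.length le_rfl, List.take_length, List.drop_length,
        List.append_nil, ih, List.flatMap_assoc]
      simp only [List.flatMap_cons, List.flatMap_nil, List.map_append, List.append_nil,
        List.map_map, Function.comp_def, String.append_assoc]
    · simp only [wildStep, wildPrepend, if_neg hch]
      rw [foldl_set_range_map (· ++ String.singleton ch) v v.length le_rfl, List.take_length,
        List.drop_length, List.append_nil, ih, List.flatMap_map]
      simp only [List.map_map, Function.comp_def, String.append_assoc]

-- ===== VERDICT (by name: the statement is the Claim_ definition above) =====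
theorem wild_spec : Claim_equal_wild := by
  intro s _
  show wild s = wild_alt s
  rw [wild, wild_alt, foldA_eq]
  simp
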